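-- pv_equiv track=rewrite | github.com/sonishivam1911/real-time-minaki-poc | api/services/nyaka/config.py | normalize_occasion
-- ===== SOURCE A (Python) =====
-- JEWELRY_DEFAULTS = {
--     "segment": "Western",  # Changed from "Fashion Jewellery"
--     "season": "Autumn/Winter 2025",  # Will be dynamic
--     "brand_size": "One Size",
--     "multipack_set": "Single",  # Changed from "1"
--     "net_qty": "1N",  # Changed from "1"
--     "occasion": "Party",  # Changed to single valid occasion
--     "age_group": "",  # Empty for adults
--     "styles_of_jewellery": "Contemporary",
--     "disclaimer": "",
--     "responsibility_criteria": "",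
--     "age": "",
--     "gender": "Women"
-- }
--
-- OCCASION_MAPPING = {
--     "Daily": "Casual",
--     "Casual": "Casual",
--     "Party": "Party",
--     "Wedding": "Wedding",
--     "Festive": "Festive Wear",
--     "Office": "Work",
--     "Formal": "Formal",
--     "Bridal": "Wedding",  # Map Bridal → Wedding
--     "Anniversary": "Special Occasion",
--     "Night Out": "Night Out",
--     "Day Wear": "Day Wear",
--     "Semi Formal": "Semi Formal",
--     "Evening": "Evening Wear",
--     "Cocktail": "Cocktail Wear",  # Already exists!
--     "Date Night": "Date Night",
--     "Festive Wear": "Festive Wear",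
--     "Wedding Wear": "Wedding Wear",
--     "Sporty": "Sports",
--     "Any": "Any Occasion",
--     "Everyday": "Everyday Essentials",
--     "Fusion": "Fusion",
--     "Resort": "Resort/Vacation",
--     "Vacation": "Resort/Vacation",
--     "Lounge": "Loungewear",
--
--     # ADD THESE CUSTOM WEDDING OCCASIONS - FIXED TO VALID VALUES:
--     "Wedding Tribe": "Wedding",
--     "Sangeet": "Wedding Wear",
--     "Mehendi": "Wedding Wear",
--     "Haldi": "Wedding Wear",
--     "Mehendi & Haldi": "Wedding Wear",
--     "Mehandi & Haldi": "Wedding Wear",  # Alternative spelling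
--     "Destination Wedding": "Wedding",
--     "Celebration": "Special Occasion",  # This IS in valid list
-- }
--
-- def normalize_occasion(occasion: str) -> str:
--     """
--     Normalize occasion to valid Nykaa value(s)
--     Handles comma-separated occasions
--     """
--     if not occasion:
--         return JEWELRY_DEFAULTS["occasion"]
--
--     # Split by comma if multiple occasions
--     occasions = [o.strip() for o in occasion.split(",")]
--     normalized = []
--
--     for occ in occasions:
--         if occ in OCCASION_MAPPING:
--             normalized_occ = OCCASION_MAPPING[occ]
--         else:
--             # Try case-insensitive match
--             found = False
--             for key, value in OCCASION_MAPPING.items():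
--                 if key.lower() == occ.lower():
--                     normalized_occ = value
--                     found = True
--                     break
--
--             if not found:
--                 # Skip invalid occasions
--                 continue
--
--         # Avoid duplicates
--         if normalized_occ not in normalized:
--             normalized.append(normalized_occ)
--
--     if not normalized:
--         return JEWELRY_DEFAULTS["occasion"]
--
--     return ", ".join(normalized)
-- ===== SOURCE B (Python) =====
-- # A single pass over the comma-split tokens with one lookup each in a hand-written
-- # lower-cased index; dedup via dict insertion order; no special empty-string guard needed
-- # (an empty string yields one empty token, which matches nothing, so the default is returned).
-- LOWER_MAP = {
--     "daily": "Casual",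
--     "casual": "Casual",
--     "party": "Party",
--     "wedding": "Wedding",
--     "festive": "Festive Wear",
--     "office": "Work",
--     "formal": "Formal",
--     "bridal": "Wedding",
--     "anniversary": "Special Occasion",
--     "night out": "Night Out",
--     "day wear": "Day Wear",
--     "semi formal": "Semi Formal",
--     "evening": "Evening Wear",
--     "cocktail": "Cocktail Wear",
--     "date night": "Date Night",
--     "festive wear": "Festive Wear",
--     "wedding wear": "Wedding Wear",
--     "sporty": "Sports",
--     "any": "Any Occasion",
--     "everyday": "Everyday Essentials",
--     "fusion": "Fusion",
--     "resort": "Resort/Vacation",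
--     "vacation": "Resort/Vacation",
--     "lounge": "Loungewear",
--     "wedding tribe": "Wedding",
--     "sangeet": "Wedding Wear",
--     "mehendi": "Wedding Wear",
--     "haldi": "Wedding Wear",
--     "mehendi & haldi": "Wedding Wear",
--     "mehandi & haldi": "Wedding Wear",
--     "destination wedding": "Wedding",
--     "celebration": "Special Occasion",
-- }
--
-- DEFAULT_OCCASION = "Party"
--
--
-- def normalize_occasion(occasion: str) -> str:
--     seen = {}
--     for part in occasion.split(","):
--         v = LOWER_MAP.get(part.strip().lower())
--         if v is not None:
--             seen[v] = True
--     return ", ".join(seen) if seen else DEFAULT_OCCASION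
-- ===== Notes on version B (the rewrite author's own statement) =====
-- stated objective: simpler
-- what changed: B replaces A's per-token exact-match-then-linear-case-insensitive-scan over the mapping and its membership-checked append list by one lookup per token in a hand-written lower-cased index with dict-insertion-order dedup, and drops A's empty-string guard (the empty token matches nothing, so the default falls out of the same path).
import Mathlib
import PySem

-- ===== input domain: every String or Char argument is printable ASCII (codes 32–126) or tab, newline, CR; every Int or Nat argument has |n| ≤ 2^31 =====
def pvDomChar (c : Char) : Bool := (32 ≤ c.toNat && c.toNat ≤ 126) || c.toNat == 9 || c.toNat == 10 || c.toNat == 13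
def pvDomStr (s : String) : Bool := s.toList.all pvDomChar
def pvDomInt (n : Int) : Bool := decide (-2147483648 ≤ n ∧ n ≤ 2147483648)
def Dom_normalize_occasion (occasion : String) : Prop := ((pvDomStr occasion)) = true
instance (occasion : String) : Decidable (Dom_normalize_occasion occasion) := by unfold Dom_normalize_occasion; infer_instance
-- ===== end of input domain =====

-- B replaces A's per-token exact-match-then-linear-case-insensitive-scan and its
-- membership-checked append loop by one lookup per token in a hand-written lower-cased
-- index with dict-insertion-order dedup (and needs no empty-string guard): simpler.

-- ===== PORT A =====
-- shared module constants (same module as the function in Source A)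
def JEWELRY_DEFAULTS : PySem.Dict String String := PySem.Dict.ofList
  [("segment", "Western"), ("season", "Autumn/Winter 2025"), ("brand_size", "One Size"),
   ("multipack_set", "Single"), ("net_qty", "1N"), ("occasion", "Party"), ("age_group", ""),
   ("styles_of_jewellery", "Contemporary"), ("disclaimer", ""), ("responsibility_criteria", ""),
   ("age", ""), ("gender", "Women")]

def OM_pairs : List (String × String) :=
  [("Daily", "Casual"), ("Casual", "Casual"), ("Party", "Party"), ("Wedding", "Wedding"),
   ("Festive", "Festive Wear"), ("Office", "Work"), ("Formal", "Formal"), ("Bridal", "Wedding"),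
   ("Anniversary", "Special Occasion"), ("Night Out", "Night Out"), ("Day Wear", "Day Wear"),
   ("Semi Formal", "Semi Formal"), ("Evening", "Evening Wear"), ("Cocktail", "Cocktail Wear"),
   ("Date Night", "Date Night"), ("Festive Wear", "Festive Wear"), ("Wedding Wear", "Wedding Wear"),
   ("Sporty", "Sports"), ("Any", "Any Occasion"), ("Everyday", "Everyday Essentials"),
   ("Fusion", "Fusion"), ("Resort", "Resort/Vacation"), ("Vacation", "Resort/Vacation"),
   ("Lounge", "Loungewear"), ("Wedding Tribe", "Wedding"), ("Sangeet", "Wedding Wear"),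
   ("Mehendi", "Wedding Wear"), ("Haldi", "Wedding Wear"), ("Mehendi & Haldi", "Wedding Wear"),
   ("Mehandi & Haldi", "Wedding Wear"), ("Destination Wedding", "Wedding"),
   ("Celebration", "Special Occasion")]

def OCCASION_MAPPING : PySem.Dict String String := PySem.Dict.ofList OM_pairs

-- A's per-token body: the 'occ in OCCASION_MAPPING' test plus indexing is get? (exact: the key is
-- present iff get? is some); the 'for key, value … if …: break' scan with its found flag is find?.
def normA_tok (occ : String) : Option String :=
  match OCCASION_MAPPING.get? occ with
  | some v => some v
  | none =>
      (OCCASION_MAPPING.items.find?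
        (fun kv => PySem.Str.lower kv.1 == PySem.Str.lower occ)).map Prod.snd

-- A's 'for occ in occasions' loop with its 'normalized' accumulator
def normA_loop : List String → List String → List String
  | [], acc => acc
  | occ :: rest, acc =>
      match normA_tok occ with
      | none => normA_loop rest acc
      | some v => normA_loop rest (if v ∈ acc then acc else acc ++ [v])

def normalize_occasion (occasion : String) : String :=
  if occasion == "" then JEWELRY_DEFAULTS.getD "occasion" ""
  else
    let occasions := ((PySem.Str.split? occasion ",").getD []).map PySem.Str.strip
    let normalized := normA_loop occasions []
    if normalized == [] then JEWELRY_DEFAULTS.getD "occasion" ""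
    else PySem.Str.join ", " normalized

-- ===== PORT B =====
-- Source B's hand-written lower-cased index, transcribed literally
def LOWER_MAP_B : PySem.Dict String String := PySem.Dict.ofList
  [("daily", "Casual"), ("casual", "Casual"), ("party", "Party"), ("wedding", "Wedding"),
   ("festive", "Festive Wear"), ("office", "Work"), ("formal", "Formal"), ("bridal", "Wedding"),
   ("anniversary", "Special Occasion"), ("night out", "Night Out"), ("day wear", "Day Wear"),
   ("semi formal", "Semi Formal"), ("evening", "Evening Wear"), ("cocktail", "Cocktail Wear"),
   ("date night", "Date Night"), ("festive wear", "Festive Wear"), ("wedding wear", "Wedding Wear"),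
   ("sporty", "Sports"), ("any", "Any Occasion"), ("everyday", "Everyday Essentials"),
   ("fusion", "Fusion"), ("resort", "Resort/Vacation"), ("vacation", "Resort/Vacation"),
   ("lounge", "Loungewear"), ("wedding tribe", "Wedding"), ("sangeet", "Wedding Wear"),
   ("mehendi", "Wedding Wear"), ("haldi", "Wedding Wear"), ("mehendi & haldi", "Wedding Wear"),
   ("mehandi & haldi", "Wedding Wear"), ("destination wedding", "Wedding"),
   ("celebration", "Special Occasion")]

def DEFAULT_OCCASION : String := "Party"

-- LOWER_MAP.get(part.strip().lower())
def lookB (part : String) : Option String :=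
  LOWER_MAP_B.get? (PySem.Str.lower (PySem.Str.strip part))

-- one iteration of the 'for part in occasion.split(",")' loop: 'seen[v] = True' when v is not None
def bstep (d : PySem.Dict String Bool) (part : String) : PySem.Dict String Bool :=
  match lookB part with
  | none => d
  | some v => d.insert v true

def normalize_occasion_alt (occasion : String) : String :=
  let seen := ((PySem.Str.split? occasion ",").getD []).foldl bstep
    (PySem.Dict.empty : PySem.Dict String Bool)
  if seen.items == [] then DEFAULT_OCCASION else PySem.Str.join ", " seen.keys

-- ===== PRECONDITION & SPEC =====
def Spec_normalize_occasion (occasion : String) (out : String) : Prop := out = normalize_occasion_alt occasion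
instance (occasion : String) (out : String) : Decidable (Spec_normalize_occasion occasion out) := by unfold Spec_normalize_occasion; infer_instance

-- ===== CLAIM (what is proved, stated in full; the proofs are below) =====
def Claim_equal_normalize_occasion : Prop := ∀ (occasion : String), Dom_normalize_occasion occasion → Spec_normalize_occasion occasion (normalize_occasion occasion)

-- ===== LEMMAS AND PROOFS =====

-- get? on a literal dict is a first-match scan of its entry list
theorem get?_mk_eq_find? (l : List (String × String)) (x : String) :
    (PySem.Dict.mk l).get? x = (l.find? (fun kv => kv.1 == x)).map Prod.snd := by
  induction l with
  | nil => simp [PySem.Dict.get?]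
  | cons kv rest ih =>
      rw [show PySem.Dict.mk (kv :: rest) = PySem.Dict.mk ((kv.1, kv.2) :: rest) by rfl,
          PySem.Dict.get?_mk_cons]
      rw [List.find?]
      by_cases h : (kv.1 == x) = true
      · simp [h]
      · simp only [h]; simpa using ih

-- an exact hit is also the first case-insensitive hit, when no two keys share a lower-casing
theorem find?_lower_of_find?_exact (l : List (String × String))
    (h : (l.map (fun kv => PySem.Str.lower kv.1)).Nodup) (occ : String) (kv : String × String)
    (hf : l.find? (fun p => p.1 == occ) = some kv) :
    l.find? (fun p => PySem.Str.lower p.1 == PySem.Str.lower occ) = some kv := by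
  induction l with
  | nil => simp at hf
  | cons q rest ih =>
      simp only [List.map_cons, List.nodup_cons] at h
      rw [List.find?] at hf
      rw [List.find?]
      by_cases hx : (q.1 == occ) = true
      · simp only [hx] at hf
        have hq : q.1 = occ := by simpa using hx
        have : (PySem.Str.lower q.1 == PySem.Str.lower occ) = true := by
          rw [hq]; simp
        rw [this]; exact hf
      · simp only [hx] at hf
        by_cases hl : (PySem.Str.lower q.1 == PySem.Str.lower occ) = true
        · exfalso
          have hmem := List.mem_of_find?_eq_some hf
          have hp : kv.1 = occ := by simpa using List.find?_some hf
          have : PySem.Str.lower q.1 ∈ rest.map (fun p => PySem.Str.lower p.1) := by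
            have heq : PySem.Str.lower q.1 = PySem.Str.lower kv.1 := by
              rw [hp]; simpa using hl
            rw [heq]
            exact List.mem_map_of_mem hmem
          exact h.1 this
        · rw [Bool.not_eq_true] at hl
          rw [hl]
          exact ih h.2 hf

set_option maxRecDepth 8192 in
theorem omap_mk : OCCASION_MAPPING = PySem.Dict.mk OM_pairs := by decide

-- B's hand-written index IS the lower-casing of A's mapping, entry for entry
set_option maxRecDepth 8192 in
theorem lmapB_mk : LOWER_MAP_B = PySem.Dict.mk (OM_pairs.map (fun kv => (PySem.Str.lower kv.1, kv.2))) := by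
  decide

-- per token, A's two-stage lookup is exactly B's lookup in the lower-cased index
set_option maxRecDepth 8192 in
theorem tok_eq (occ : String) :
    normA_tok occ = LOWER_MAP_B.get? (PySem.Str.lower occ) := by
  have hnd : (OM_pairs.map (fun kv => PySem.Str.lower kv.1)).Nodup := by decide
  have hsnd : ∀ (o : Option (String × String)),
      (o.map (fun kv => (PySem.Str.lower kv.1, kv.2))).map Prod.snd = o.map Prod.snd := by
    intro o; cases o <;> rfl
  have h1 : OCCASION_MAPPING.get? occ = (OM_pairs.find? (fun p => p.1 == occ)).map Prod.snd := by
    rw [omap_mk, get?_mk_eq_find?]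
  have h2 : LOWER_MAP_B.get? (PySem.Str.lower occ)
      = (OM_pairs.find? (fun p => PySem.Str.lower p.1 == PySem.Str.lower occ)).map Prod.snd := by
    rw [lmapB_mk, get?_mk_eq_find?, List.find?_map]
    have hc : ((fun kv : String × String => kv.1 == PySem.Str.lower occ) ∘
        (fun kv : String × String => (PySem.Str.lower kv.1, kv.2)))
        = (fun p : String × String => PySem.Str.lower p.1 == PySem.Str.lower occ) := rfl
    rw [hc, hsnd]
  have hitems : OCCASION_MAPPING.items = OM_pairs := by rw [omap_mk]
  rw [normA_tok, hitems, h1, h2]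
  cases hf : OM_pairs.find? (fun p => p.1 == occ) with
  | none => simp
  | some kv =>
      rw [find?_lower_of_find?_exact OM_pairs hnd occ kv hf]
      rfl

-- A's accumulator loop is a fold of Set.add over the tokens that match
theorem loop_eq_foldl (ts : List String) (acc : List String) :
    normA_loop ts acc = (ts.filterMap normA_tok).foldl PySem.Set.add acc := by
  induction ts generalizing acc with
  | nil => rfl
  | cons t rest ih =>
      rw [normA_loop, List.filterMap_cons]
      cases h : normA_tok t with
      | none => simpa [h] using ih acc
      | some v =>
          simp only [List.foldl_cons]
          rw [ih, PySem.Set.add_eq_ite]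

-- the keys collected by B's dict loop are exactly a Set.add fold over the matched values
theorem keys_foldl_bstep (splits : List String) (d : PySem.Dict String Bool) :
    (splits.foldl bstep d).keys = (splits.filterMap lookB).foldl PySem.Set.add d.keys := by
  induction splits generalizing d with
  | nil => rfl
  | cons t rest ih =>
      rw [List.foldl_cons]
      cases h : lookB t with
      | none =>
          rw [List.filterMap_cons_none h, ih,
              show bstep d t = d from by unfold bstep; rw [h]]
      | some v =>
          rw [List.filterMap_cons_some h, List.foldl_cons, ih]
          have hk : (d.insert v true).keys = PySem.Set.add d.keys v := by
            by_cases hc : d.contains v = true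
            · rw [PySem.Dict.keys_insert_of_contains (h := hc),
                  PySem.Set.add_of_mem ((PySem.Dict.contains_iff_mem_keys d v).mp hc)]
            · have hc' : d.contains v = false := by simpa using hc
              rw [PySem.Dict.keys_insert_of_not_contains (h := hc'),
                  PySem.Set.add_of_not_mem
                    (fun hm => hc ((PySem.Dict.contains_iff_mem_keys d v).mpr hm))]
          rw [show bstep d t = d.insert v true from by simp [bstep, h], hk]

set_option maxRecDepth 8192 in
set_option maxHeartbeats 1000000 in
theorem normalize_occasion_eq (occasion : String) :
    normalize_occasion occasion = normalize_occasion_alt occasion := by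
  by_cases h : (occasion == "") = true
  · have he : occasion = "" := by simpa using h
    subst he
    decide
  · rw [normalize_occasion, normalize_occasion_alt]
    simp only [h, Bool.false_eq_true, if_neg, not_false_iff]
    set splits := (PySem.Str.split? occasion ",").getD [] with hs
    have hA : normA_loop (splits.map PySem.Str.strip) []
        = (splits.filterMap lookB).foldl PySem.Set.add [] := by
      have htok : (normA_tok ∘ PySem.Str.strip) = lookB :=
        funext fun o => tok_eq (PySem.Str.strip o)
      rw [loop_eq_foldl, List.filterMap_map, htok]
    set seen := splits.foldl bstep (PySem.Dict.empty : PySem.Dict String Bool) with hsn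
    have hkeys : normA_loop (splits.map PySem.Str.strip) [] = seen.keys := by
      rw [hA, hsn, keys_foldl_bstep]
      rfl
    rw [hkeys]
    have hempty : (seen.keys == []) = (seen.items == []) := by
      cases hit : seen.items with
      | nil => simp [PySem.Dict.keys, hit]
      | cons p rest => simp [PySem.Dict.keys, hit]
    rw [hempty]
    by_cases hz : (seen.items == []) = true
    · simp [hz]; rfl
    · simp [hz]

-- ===== VERDICT (by name: the statement is the Claim_ definition above) =====
theorem normalize_occasion_spec : Claim_equal_normalize_occasion := by
  intro occasion _
  unfold Spec_normalize_occasion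
  exact normalize_occasion_eq occasion
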